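-- pv_equiv track=rewrite | github.com/daniel-reich/ubiquitous-fiesta | WixXhsdqcNHe3vTn3_16.py | how_bad
-- ===== SOURCE A (Python) =====
-- def how_bad(n):
--   result = []
--   population = bin(n)[2:].count('1')
--   if not population % 2:
--     result.append('Evil')
--   else:
--     result.append('Odious')
--   prime = True
--   if population == 1:
--     return result
--   for num in range(2, population):
--     if not population % num:
--       prime = False
--       break
--   if prime:
--     result.append('Pernicious')
--   return result
-- ===== SOURCE B (Python) =====
-- def how_bad(n):
--     p = abs(n).bit_count()
--     result = ['Evil' if p % 2 == 0 else 'Odious']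
--     if p == 1:
--         return result
--     prime = True
--     d = 2
--     while d * d <= p:
--         if p % d == 0:
--             prime = False
--             break
--         d += 1
--     if prime:
--         result.append('Pernicious')
--     return result
-- ===== Notes on version B (the rewrite author's own statement) =====
-- stated objective: alternative
-- what changed: B computes the popcount with int.bit_count instead of building the binary string, and tests its primality with a sqrt-bounded while loop (d*d <= p) instead of trial division over all of range(2, population); the early return for a one-bit popcount and the prime verdict for an empty loop are preserved.
import Mathlib
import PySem

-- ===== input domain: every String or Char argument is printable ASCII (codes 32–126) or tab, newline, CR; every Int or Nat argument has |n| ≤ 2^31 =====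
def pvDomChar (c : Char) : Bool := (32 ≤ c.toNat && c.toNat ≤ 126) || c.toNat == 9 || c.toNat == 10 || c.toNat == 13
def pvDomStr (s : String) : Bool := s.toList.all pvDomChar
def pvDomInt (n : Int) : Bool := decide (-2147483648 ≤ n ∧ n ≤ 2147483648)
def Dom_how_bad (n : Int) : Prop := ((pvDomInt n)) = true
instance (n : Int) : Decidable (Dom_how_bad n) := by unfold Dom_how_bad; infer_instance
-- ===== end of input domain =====

-- B replaces the binary-string build + range(2, population) trial division by bit_count and a
-- √-bounded divisor loop (d*d <= p); same results on every input of the domain.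

-- ===== PORT A =====
-- bin(n) renders the binary digits of |n| (prefixed by '-0b'/'0b'); bin(n)[2:].count('1') is
-- therefore exactly the count of '1' characters in this digit list (the leftover 'b' of a
-- negative n contributes no '1').  pyBinDigits n = binary digit characters of n (lsb-first;
-- ['0'] for 0; digit order is irrelevant to the count).  Exact on all Int.
def pyBinDigitsGo : Nat → List Char
  | 0 => []
  | (n+1) => (if (n+1) % 2 = 1 then '1' else '0') :: pyBinDigitsGo ((n+1) / 2)

def pyBinDigits (n : Nat) : List Char := if n = 0 then ['0'] else pyBinDigitsGo n

-- the 'for num in range(2, population)' loop with its break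
def howBadLoopA : List Int → Int → Bool
  | [], _ => true
  | num :: rest, population =>
      if PySem.Int.mod population num == 0 then false else howBadLoopA rest population

-- everything after 'population = …', step for step
def howBadFinishA (population : Int) : List String :=
  let result : List String :=
    if PySem.Int.mod population 2 == 0 then ["Evil"] else ["Odious"]
  if population == 1 then result
  else
    let prime := howBadLoopA (PySem.List.pyRange 2 population 1) population
    if prime then result ++ ["Pernicious"] else result

def how_bad (n : Int) : List String :=
  howBadFinishA (((pyBinDigits n.natAbs).count '1' : Nat) : Int)

-- ===== PORT B =====
-- port of int.bit_count (popcount of |n|); the fuel argument only guarantees termination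
-- (n halves each step, so fuel = n always suffices), the computation is abs(n).bit_count()
def bitCountB : Nat → Nat → Nat
  | 0, _ => 0
  | _+1, 0 => 0
  | f+1, (n+1) => (n+1) % 2 + bitCountB f ((n+1) / 2)

-- the 'while d*d <= p' trial-division loop; fuel only for termination (p+1 always suffices)
def trialDivB : Nat → Nat → Nat → Bool
  | 0, _, _ => true
  | f+1, p, d =>
      if d * d ≤ p then
        (if p % d = 0 then false else trialDivB f p (d+1))
      else true

def howBadFinishB (p : Nat) : List String :=
  let result : List String := if p % 2 == 0 then ["Evil"] else ["Odious"]
  if p == 1 then result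
  else if trialDivB (p+1) p 2 then result ++ ["Pernicious"] else result

def how_bad_alt (n : Int) : List String :=
  howBadFinishB (bitCountB n.natAbs n.natAbs)

-- ===== PRECONDITION & SPEC =====
def Spec_how_bad (n : Int) (out : List String) : Prop := out = how_bad_alt n
instance (n : Int) (out : List String) : Decidable (Spec_how_bad n out) := by unfold Spec_how_bad; infer_instance

-- ===== CLAIM (what is proved, stated in full; the proofs are below) =====
def Claim_equal_how_bad : Prop := ∀ (n : Int), Dom_how_bad n → Spec_how_bad n (how_bad n)

-- ===== LEMMAS AND PROOFS =====

-- bit_count with enough fuel = counting the '1' digits of the binary rendering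
theorem bitCountB_count (f : Nat) : ∀ n, n ≤ f → bitCountB f n = (pyBinDigitsGo n).count '1' := by
  induction f with
  | zero =>
    intro n h
    interval_cases n
    simp [bitCountB, pyBinDigitsGo]
  | succ f ih =>
    intro n h
    match n with
    | 0 => simp [bitCountB, pyBinDigitsGo]
    | (m+1) =>
      rw [bitCountB, pyBinDigitsGo, List.count_cons, ih ((m+1)/2) (by omega)]
      rcases Nat.mod_two_eq_zero_or_one (m+1) with h2 | h2 <;> simp [h2, Nat.add_comm]

theorem count_pyBinDigits (n : Nat) : (pyBinDigits n).count '1' = (pyBinDigitsGo n).count '1' := by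
  unfold pyBinDigits
  split
  · subst ‹n = 0›; simp [pyBinDigitsGo]
  · rfl

-- popcount of a number below 2^k is at most k
theorem count_lt_pow (k : Nat) : ∀ n, n < 2 ^ k → (pyBinDigitsGo n).count '1' ≤ k := by
  induction k with
  | zero =>
    intro n h
    interval_cases n
    simp [pyBinDigitsGo]
  | succ k ih =>
    intro n h
    match n with
    | 0 => simp [pyBinDigitsGo]
    | (m+1) =>
      rw [pyBinDigitsGo, List.count_cons]
      have h2 : (m+1) / 2 < 2 ^ k := by
        have : 2 ^ (k+1) = 2 ^ k * 2 := by ring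
        omega
      have := ih _ h2
      rcases Nat.mod_two_eq_zero_or_one (m+1) with hm | hm <;> simp [hm] <;> omega

-- the two classifications agree for every population a 32-bit input can have
theorem finish_eq : ∀ p : Nat, p ≤ 32 → howBadFinishA (p : Int) = howBadFinishB p := by
  decide

theorem how_bad_spec : Claim_equal_how_bad := by
  intro n hDom
  unfold Spec_how_bad how_bad how_bad_alt
  rw [count_pyBinDigits, bitCountB_count n.natAbs n.natAbs le_rfl]
  apply finish_eq
  have hb : n.natAbs < 2 ^ 32 := by
    have h : -2147483648 ≤ n ∧ n ≤ 2147483648 := by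
      unfold Dom_how_bad pvDomInt at hDom
      exact of_decide_eq_true hDom
    omega
  exact count_lt_pow 32 n.natAbs hb
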